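-- pv_equiv track=rewrite | github.com/EthanJTucker/DTSA_5503_HW | DTSA_5503_HW3.py | compute_makespan
-- ===== SOURCE A (Python) =====
-- def compute_makespan(times, m, assign):
--     # times is an array of job times of size n
--     # m is the number of processors
--     # assign is an array of size n whose entries are between 0 to m-1
--     # indicating the processor number for
--     # the corresponding job.
--     # Return: makespan of the assignment
--     # your code here
--
--     total_times = [0]*m
--     n = len(times)
--
--     for i in range(n):
--         this_processor = assign[i]
--         this_time = times[i]
--         total_times[this_processor] = total_times[this_processor] + this_time
--
--     makespan = max(total_times)
--     return(makespan)
-- ===== SOURCE B (Python) =====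
-- def compute_makespan(times, m, assign):
--     # Sort the jobs by processor, then walk the sorted list once, summing each
--     # run of equal processor ids and depositing that group total into the
--     # processor's slot; the makespan is the largest slot.
--     loads = [0] * m
--     jobs = sorted(zip(assign, times))
--     i = 0
--     while i < len(jobs):
--         p = jobs[i][0]
--         total = 0
--         while i < len(jobs) and jobs[i][0] == p:
--             total += jobs[i][1]
--             i += 1
--         loads[p] += total
--     return max(loads)
-- ===== Notes on version B (the rewrite author's own statement) =====
-- stated objective: alternative
-- what changed: B sorts the (processor, time) pairs, scans the sorted list once summing each run of equal processor ids, and writes one group total per run into the per-processor slot list, instead of A's unsorted job-indexed pass that updates a slot per job; the max over slots is unchanged.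
import Mathlib
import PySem

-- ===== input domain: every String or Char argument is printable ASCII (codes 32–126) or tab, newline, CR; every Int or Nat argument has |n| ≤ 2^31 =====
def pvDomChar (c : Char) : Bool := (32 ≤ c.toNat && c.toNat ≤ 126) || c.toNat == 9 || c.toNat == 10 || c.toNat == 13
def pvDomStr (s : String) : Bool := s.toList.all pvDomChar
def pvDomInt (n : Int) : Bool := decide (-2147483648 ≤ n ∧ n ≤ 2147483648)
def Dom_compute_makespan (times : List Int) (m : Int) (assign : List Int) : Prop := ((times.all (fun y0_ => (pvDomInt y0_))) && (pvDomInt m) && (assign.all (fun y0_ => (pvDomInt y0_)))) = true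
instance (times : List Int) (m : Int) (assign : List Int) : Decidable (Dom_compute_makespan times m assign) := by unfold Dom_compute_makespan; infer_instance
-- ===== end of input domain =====

-- B sorts the (processor, time) pairs and scans the sorted list once, writing one
-- run total per processor into the slot list, instead of A's unsorted per-job pass
-- (objective: alternative decomposition; not faster).

-- ===== PORT A =====
def compute_makespan (times : List Int) (m : Int) (assign : List Int) : Int :=
  let total_times : List Int := List.replicate m.toNat 0   -- [0]*m ([] for m ≤ 0)
  let n := times.length
  let total_times :=
    (List.range n).foldl (fun (acc : List Int) (i : Nat) =>
      let this_processor := PySem.List.pyGetD assign (i : Int) 0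
      let this_time := PySem.List.pyGetD times (i : Int) 0
      -- total_times[this_processor] = total_times[this_processor] + this_time
      PySem.List.pySetD acc this_processor
        (PySem.List.pyGetD acc this_processor 0 + this_time))
      total_times
  -- max(total_times): raises on an empty list (m ≤ 0), excluded by Pre_
  (PySem.List.max? total_times (fun y => y)).getD 0

-- ===== PORT B =====
-- B's inner while loop: consume the run of entries whose processor id equals p,
-- returning the run's total time and the rest of the list
def pvTakeRun (p : Int) (jobs : List (Int × Int)) : Int × List (Int × Int) :=
  match jobs with
  | [] => (0, [])
  | (q, t) :: rest =>
      if q == p then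
        let r := pvTakeRun p rest
        (t + r.1, r.2)
      else (0, (q, t) :: rest)

theorem pvTakeRun_length_le (p : Int) (jobs : List (Int × Int)) :
    (pvTakeRun p jobs).2.length ≤ jobs.length := by
  induction jobs with
  | nil => simp [pvTakeRun]
  | cons x rest ih =>
      obtain ⟨q, t⟩ := x
      by_cases h : q == p <;> simp [pvTakeRun, h]
      omega

-- B's outer while loop over the sorted job list
def pvScan (jobs : List (Int × Int)) (loads : List Int) : List Int :=
  match jobs with
  | [] => loads
  | (p, t) :: rest =>
      let r := pvTakeRun p rest
      pvScan r.2
        (PySem.List.pySetD loads p (PySem.List.pyGetD loads p 0 + (t + r.1)))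
  termination_by jobs.length
  decreasing_by
    simpa using Nat.lt_succ_of_le (pvTakeRun_length_le p rest)

def compute_makespan_alt (times : List Int) (m : Int) (assign : List Int) : Int :=
  let loads : List Int := List.replicate m.toNat 0
  let jobs := PySem.List.sorted2 (assign.zip times) Prod.fst Prod.snd
  let loads := pvScan jobs loads
  (PySem.List.max? loads (fun y => y)).getD 0

-- ===== PRECONDITION & SPEC =====
-- Pre_ excludes exactly the inputs on which A raises: m ≤ 0 (max of an empty list is a
-- ValueError), a job index i < len(times) with no assign[i] (IndexError), and an
-- assign[i] outside [-m, m) (IndexError on total_times[assign[i]]).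
def Pre_compute_makespan (times : List Int) (m : Int) (assign : List Int) : Prop :=
  0 < m ∧ times.length ≤ assign.length ∧
    ∀ a ∈ assign.take times.length, -m ≤ a ∧ a < m
instance (times : List Int) (m : Int) (assign : List Int) : Decidable (Pre_compute_makespan times m assign) := by unfold Pre_compute_makespan; infer_instance

def pvWitness_compute_makespan : List Int × Int × List Int := ([3, 1, 4], 2, [0, -1, 0])

def Spec_compute_makespan (times : List Int) (m : Int) (assign : List Int) (out : Int) : Prop := out = compute_makespan_alt times m assign
instance (times : List Int) (m : Int) (assign : List Int) (out : Int) : Decidable (Spec_compute_makespan times m assign out) := by unfold Spec_compute_makespan; infer_instance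

-- ===== CLAIM (what is proved, stated in full; the proofs are below) =====
def Claim_equal_compute_makespan : Prop := ∀ (times : List Int) (m : Int) (assign : List Int), Dom_compute_makespan times m assign → Pre_compute_makespan times m assign → Spec_compute_makespan times m assign (compute_makespan times m assign)

-- ===== LEMMAS AND PROOFS =====

-- per-processor load of a list of (time, processor) pairs
def pvLoad (m : Int) (L : List (Int × Int)) (p : Int) : Int :=
  ((L.filter (fun tp => PySem.Int.mod tp.2 m == p)).map Prod.fst).sum

-- the body of A's loop, expressed on a (time, processor) pair
def pvStep (acc : List Int) (tp : Int × Int) : List Int :=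
  PySem.List.pySetD acc tp.2 (PySem.List.pyGetD acc tp.2 0 + tp.1)

-- one slot update of B's scan, on a (processor, time) pair
def pvStepB (acc : List Int) (pt : Int × Int) : List Int :=
  PySem.List.pySetD acc pt.1 (PySem.List.pyGetD acc pt.1 0 + pt.2)

-- the list index a Python update at index a really touches, for -M ≤ a < M
def pvIdx (M : Nat) (a : Int) : Nat :=
  if 0 ≤ a then a.toNat else M - (-a).toNat

theorem pvLoad_cons (m t a p : Int) (L : List (Int × Int)) :
    pvLoad m ((t, a) :: L) p
      = (if PySem.Int.mod a m = p then t else 0) + pvLoad m L p := by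
  by_cases h : PySem.Int.mod a m = p <;> simp [pvLoad, h]

theorem pvLoad_perm (m : Int) {L L' : List (Int × Int)} (h : L.Perm L') (p : Int) :
    pvLoad m L p = pvLoad m L' p :=
  List.Perm.sum_eq ((h.filter _).map _)

theorem pvIdx_spec (M : Nat) (a : Int) (h0 : -(M : Int) ≤ a) (h1 : a < (M : Int)) :
    PySem.List.pyIdx? M a = some (pvIdx M a) := by
  unfold pvIdx
  simp only [PySem.List.pyIdx?]
  split_ifs <;> first | rfl | omega

theorem pvIdx_lt (M : Nat) (a : Int) (h0 : -(M : Int) ≤ a) (h1 : a < (M : Int)) :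
    pvIdx M a < M := by
  have hM : 0 < M := by omega
  unfold pvIdx; split_ifs <;> omega

-- pyGetD / pySetD at an in-range (possibly negative) index, as Nat-indexed get/set
theorem pvGetD_eq (acc : List Int) (a d : Int)
    (h0 : -(acc.length : Int) ≤ a) (h1 : a < (acc.length : Int)) :
    PySem.List.pyGetD acc a d = acc.getD (pvIdx acc.length a) d := by
  have hidx := pvIdx_spec acc.length a h0 h1
  have hk := pvIdx_lt acc.length a h0 h1
  simp [PySem.List.pyGetD, PySem.List.pyGet?, hidx, List.getElem?_eq_getElem hk]

theorem pvSetD_eq (acc : List Int) (a v : Int)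
    (h0 : -(acc.length : Int) ≤ a) (h1 : a < (acc.length : Int)) :
    PySem.List.pySetD acc a v = acc.set (pvIdx acc.length a) v := by
  have hidx := pvIdx_spec acc.length a h0 h1
  simp [PySem.List.pySetD, PySem.List.pySet?, hidx]

-- A's index-driven loop is the fold of pvStep over the zip (prefix form, by induction on the count)
theorem pvFold_index_eq_zip (times assign : List Int) (acc : List Int) (k : Nat)
    (hk : k ≤ times.length) (hlen : times.length ≤ assign.length) :
    (List.range k).foldl (fun (acc : List Int) (i : Nat) =>
        PySem.List.pySetD acc (PySem.List.pyGetD assign (i : Int) 0)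
          (PySem.List.pyGetD acc (PySem.List.pyGetD assign (i : Int) 0) 0 +
            PySem.List.pyGetD times (i : Int) 0)) acc
      = ((times.zip assign).take k).foldl pvStep acc := by
  induction k with
  | zero => simp
  | succ k ih =>
      have hk' : k ≤ times.length := Nat.le_of_succ_le hk
      have hkz : k < (times.zip assign).length := by
        simp [List.length_zip]; omega
      rw [List.range_succ, List.foldl_append, ih hk']
      have htake : ((times.zip assign).take (k + 1))
          = ((times.zip assign).take k) ++ [(times.zip assign)[k]] := by
        rw [List.take_add_one]
        simp [List.getElem?_eq_getElem hkz]
      rw [htake, List.foldl_append]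
      have h1 : PySem.List.pyGetD times (k : Int) 0 = times[k]'(by omega) := by
        rw [PySem.List.pyGetD_eq_getElem times 0 (by positivity) (by exact_mod_cast (by omega : k < times.length))]
        simp
      have h2 : PySem.List.pyGetD assign (k : Int) 0 = assign[k]'(by omega) := by
        rw [PySem.List.pyGetD_eq_getElem assign 0 (by positivity) (by exact_mod_cast (by omega : k < assign.length))]
        simp
      simp only [List.foldl_cons, List.foldl_nil, pvStep, List.getElem_zip, h1, h2]

-- loop invariant: folding pvStep over pairs with processors in [-M, M)
-- sends (range M).map f to (range M).map (f + load)
theorem pvFold_step_inv (L : List (Int × Int)) (M : Nat) (f : Nat → Int)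
    (h : ∀ tp ∈ L, -(M : Int) ≤ tp.2 ∧ tp.2 < (M : Int)) :
    L.foldl pvStep ((List.range M).map f)
      = (List.range M).map (fun j : Nat => f j + pvLoad (M : Int) L ((j : Nat) : Int)) := by
  induction L generalizing f with
  | nil => simp [pvLoad]
  | cons tp L ih =>
      obtain ⟨t, a⟩ := tp
      obtain ⟨ha0, haM⟩ := h (t, a) (by simp)
      simp only at ha0 haM
      have hM : 0 < M := by omega
      have hkM : pvIdx M a < M := pvIdx_lt M a (by simpa using ha0) haM
      have hidx : PySem.List.pyIdx? M a = some (pvIdx M a) :=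
        pvIdx_spec M a (by simpa using ha0) haM
      have hmod : PySem.Int.mod a (M : Int) = ((pvIdx M a : Nat) : Int) := by
        rw [PySem.Int.mod_eq_emod_of_pos (by exact_mod_cast hM)]
        unfold pvIdx
        split_ifs with h0
        · rw [Int.emod_eq_of_lt h0 haM]; omega
        · have h1 : a % (M : Int) = (a + M) % M := by
            conv_rhs => rw [show a + (M : Int) = a + (M : Int) * 1 by ring,
              Int.add_mul_emod_self_left]
          rw [h1, Int.emod_eq_of_lt (by omega) (by omega)]
          omega
      rw [List.foldl_cons]
      have hget : PySem.List.pyGetD ((List.range M).map f) a 0 = f (pvIdx M a) := by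
        simp [PySem.List.pyGetD, PySem.List.pyGet?, hidx, List.getElem?_map,
          List.getElem?_range hkM]
      have hstep : pvStep ((List.range M).map f) (t, a)
          = (List.range M).map (fun j => if j = pvIdx M a then f (pvIdx M a) + t else f j) := by
        simp only [pvStep, hget, PySem.List.pySetD, PySem.List.pySet?, List.length_map,
          List.length_range, hidx, Option.map_some, Option.getD_some]
        apply List.ext_getElem
        · simp
        · intro i hlen1 hlen2
          simp only [List.getElem_set, List.getElem_map, List.getElem_range]
          rcases eq_or_ne i (pvIdx M a) with hi | hi
          · simp [hi]
          · simp [hi, Ne.symm hi]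
      rw [hstep, ih _ (fun tp htp => h tp (by simp [htp]))]
      apply List.map_congr_left
      intro j hj
      rw [pvLoad_cons]
      by_cases hja : j = pvIdx M a
      · rw [hja, hmod]
        simp only [if_true]
        ring
      · rw [if_neg hja,
          if_neg (by rw [hmod]; intro e; exact hja (by exact_mod_cast e.symm))]
        ring

-- pvTakeRun is takeWhile/dropWhile on the processor id
theorem pvTakeRun_eq (p : Int) (jobs : List (Int × Int)) :
    pvTakeRun p jobs
      = (((jobs.takeWhile (fun x => x.1 == p)).map Prod.snd).sum,
          jobs.dropWhile (fun x => x.1 == p)) := by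
  induction jobs with
  | nil => simp [pvTakeRun]
  | cons x rest ih =>
      obtain ⟨q, t⟩ := x
      by_cases h : q == p <;>
        simp [pvTakeRun, h, ih]

-- folding a run of pairs that all carry processor id p collapses to one slot update
theorem pvRunFold (p : Int) (run : List (Int × Int)) (acc : List Int) (v : Int)
    (hall : ∀ x ∈ run, x.1 = p)
    (h0 : -(acc.length : Int) ≤ p) (h1 : p < (acc.length : Int)) :
    run.foldl pvStepB (PySem.List.pySetD acc p v)
      = PySem.List.pySetD acc p (v + (run.map Prod.snd).sum) := by
  induction run generalizing v with
  | nil => simp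
  | cons x run ih =>
      obtain ⟨q, t⟩ := x
      have hq : q = p := hall (q, t) (by simp)
      subst hq
      have hk := pvIdx_lt acc.length q h0 h1
      have hset := pvSetD_eq acc q v h0 h1
      have hlen : (PySem.List.pySetD acc q v).length = acc.length := by
        simp [hset]
      rw [List.foldl_cons]
      have hstep : pvStepB (PySem.List.pySetD acc q v) (q, t)
          = PySem.List.pySetD acc q (v + t) := by
        simp only [pvStepB]
        rw [pvGetD_eq _ q 0 (by rw [hlen]; exact h0) (by rw [hlen]; exact h1),
          pvSetD_eq _ q _ (by rw [hlen]; exact h0) (by rw [hlen]; exact h1),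
          hset, pvSetD_eq acc q _ h0 h1]
        simp only [List.length_set, List.set_set]
        rw [List.getD_eq_getElem _ _ (by simpa using hk), List.getElem_set_self]
      rw [hstep, ih (v + t) (fun x hx => hall x (List.mem_cons_of_mem _ hx))]
      simp only [List.map_cons, List.sum_cons]
      congr 1
      ring

-- B's scan is the fold of one-at-a-time slot updates over the same list
theorem pvScan_eq_foldl (jobs : List (Int × Int)) (loads : List Int)
    (hb : ∀ x ∈ jobs, -(loads.length : Int) ≤ x.1 ∧ x.1 < (loads.length : Int)) :
    pvScan jobs loads = jobs.foldl pvStepB loads := by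
  induction jobs, loads using pvScan.induct with
  | case1 loads => simp [pvScan]
  | case2 loads p t rest r ih =>
      obtain ⟨h0, h1⟩ := hb (p, t) (by simp)
      have hreq : r = (((rest.takeWhile (fun x => x.1 == p)).map Prod.snd).sum,
          rest.dropWhile (fun x => x.1 == p)) := pvTakeRun_eq p rest
      have hlen : ∀ w : Int, (PySem.List.pySetD loads p w).length = loads.length := by
        intro w; rw [pvSetD_eq loads p _ h0 h1]; simp
      have hb2 : ∀ x ∈ rest.dropWhile (fun x => x.1 == p),
          -(loads.length : Int) ≤ x.1 ∧ x.1 < (loads.length : Int) := by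
        intro x hx
        exact hb x (by simp [(List.dropWhile_sublist _).mem hx])
      simp only [hreq, hlen] at ih
      rw [pvScan]
      simp only [pvTakeRun_eq]
      rw [ih hb2]
      conv_rhs => rw [List.foldl_cons,
        ← List.takeWhile_append_dropWhile (p := fun x => x.1 == p) (l := rest),
        List.foldl_append]
      congr 1
      have hallrun : ∀ x ∈ rest.takeWhile (fun x => x.1 == p), x.1 = p := by
        intro x hx
        simpa using List.mem_takeWhile_imp hx
      rw [show pvStepB loads (p, t)
          = PySem.List.pySetD loads p (PySem.List.pyGetD loads p 0 + t) from rfl,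
        pvRunFold p _ loads _ hallrun h0 h1]
      congr 1
      ring

theorem pvMain (times : List Int) (m : Int) (assign : List Int)
    (hm : 0 < m) (hlen : times.length ≤ assign.length)
    (hr : ∀ a ∈ assign.take times.length, -m ≤ a ∧ a < m) :
    compute_makespan times m assign = compute_makespan_alt times m assign := by
  simp only [compute_makespan, compute_makespan_alt]
  have hmz : ((m.toNat : Nat) : Int) = m := Int.toNat_of_nonneg (le_of_lt hm)
  have hzlen : (times.zip assign).length = times.length := by
    simp [List.length_zip]; omega
  have hbound : ∀ tp ∈ times.zip assign, -((m.toNat : Nat) : Int) ≤ tp.2 ∧ tp.2 < ((m.toNat : Nat) : Int) := by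
    intro tp htp
    rw [hmz]
    rcases List.mem_iff_getElem.mp htp with ⟨i, hi, rfl⟩
    have hia : i < assign.length := by rw [hzlen] at hi; omega
    have : assign[i] ∈ assign.take times.length := by
      apply List.mem_take_iff_getElem.mpr
      exact ⟨i, by omega, by simp⟩
    simpa [List.getElem_zip] using hr _ this
  -- the sorted job list and its (time, processor) view
  have hperm : ((PySem.List.sorted2 (assign.zip times) Prod.fst Prod.snd).map
      Prod.swap).Perm (times.zip assign) := by
    have h1 := (PySem.List.sorted2_perm (xs := assign.zip times)
      (k1 := Prod.fst) (k2 := Prod.snd) (rev := false)).map Prod.swap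
    rwa [List.zip_swap] at h1
  have hboundB : ∀ tp ∈ (PySem.List.sorted2 (assign.zip times) Prod.fst Prod.snd).map
      Prod.swap, -((m.toNat : Nat) : Int) ≤ tp.2 ∧ tp.2 < ((m.toNat : Nat) : Int) :=
    fun tp htp => hbound tp (hperm.mem_iff.mp htp)
  have hrepl : List.replicate m.toNat (0 : Int) = (List.range m.toNat).map (fun _ => (0 : Int)) := by
    simp [List.map_const']
  -- A's side
  have hfold := pvFold_index_eq_zip times assign (List.replicate m.toNat 0) times.length le_rfl hlen
  rw [List.take_of_length_le (le_of_eq hzlen)] at hfold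
  -- B's side: scan = fold of pvStepB = fold of pvStep over the swapped list
  have hbS : ∀ x ∈ PySem.List.sorted2 (assign.zip times) Prod.fst Prod.snd,
      -((List.replicate m.toNat (0 : Int)).length : Int) ≤ x.1 ∧
        x.1 < ((List.replicate m.toNat (0 : Int)).length : Int) := by
    intro x hx
    simpa using hboundB x.swap (List.mem_map_of_mem hx)
  have hswap : pvScan (PySem.List.sorted2 (assign.zip times) Prod.fst Prod.snd)
        (List.replicate m.toNat 0)
      = ((PySem.List.sorted2 (assign.zip times) Prod.fst Prod.snd).map Prod.swap).foldl
          pvStep (List.replicate m.toNat 0) := by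
    rw [pvScan_eq_foldl _ _ hbS, List.foldl_map]
    rfl
  rw [hfold, hswap, hrepl,
    pvFold_step_inv (times.zip assign) m.toNat (fun _ => 0) hbound,
    pvFold_step_inv _ m.toNat (fun _ => 0) hboundB]
  refine congrArg (fun l => (PySem.List.max? l (fun y => y)).getD 0) ?_
  exact List.map_congr_left fun j hj => by
    rw [pvLoad_perm _ hperm]

-- ===== VERDICT (by name: the statement is the Claim_ definition above) =====
theorem compute_makespan_spec : Claim_equal_compute_makespan := by
  intro times m assign _ hpre
  obtain ⟨hm, hlen, hr⟩ := hpre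
  exact pvMain times m assign hm hlen hr
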